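-- pv_equiv track=rewrite | github.com/nategold080/school-board-votes | extraction/rule_engine.py | _deduplicate_votes
-- ===== SOURCE A (Python) =====
-- def _deduplicate_votes(individual_votes: list) -> list:
--     """Remove duplicate member entries from individual votes.
--
--     When a member appears multiple times (from overlapping text regions
--     or duplicate content in agenda/minutes), keep only one entry per member.
--     If votes conflict (e.g., YES from an adjacent unanimous vote and NO from
--     the actual contested vote), prefer NO/ABSTAIN — explicit dissent is a
--     more reliable signal than inclusion in a general YES list.
--     """
--     if not individual_votes:
--         return individual_votes
--
--     # Priority: no > abstain > absent > yes
--     # Dissent is a deliberate signal; YES can come from adjacent unanimous votes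
--     vote_priority = {"no": 4, "abstain": 3, "absent": 2, "yes": 1}
--
--     seen = {}  # lowercase name -> (entry, priority)
--     for vote_entry in individual_votes:
--         name_lower = vote_entry["member_name"].strip().lower()
--         priority = vote_priority.get(vote_entry["member_vote"], 0)
--
--         if name_lower not in seen or priority > seen[name_lower][1]:
--             seen[name_lower] = (vote_entry, priority)
--
--     return [entry for entry, _ in seen.values()]
-- ===== SOURCE B (Python) =====
-- def _deduplicate_votes(individual_votes: list) -> list:
--     """Group votes by normalized member name, then pick the highest-priority
--     entry per group (max returns the first maximal element, preserving A's
--     first-wins tie-break; dict order preserves first appearance)."""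
--     if not individual_votes:
--         return individual_votes
--
--     vote_priority = {"no": 4, "abstain": 3, "absent": 2, "yes": 1}
--
--     groups = {}
--     for vote_entry in individual_votes:
--         groups.setdefault(vote_entry["member_name"].strip().lower(), []).append(vote_entry)
--
--     return [max(group, key=lambda e: vote_priority.get(e["member_vote"], 0))
--             for group in groups.values()]
-- ===== Notes on version B (the rewrite author's own statement) =====
-- stated objective: alternative
-- what changed: Replaces A's single-pass running-max-per-name dict with a two-phase build-all-groups (ordered dict of lists via setdefault) then select-first-maximal-per-group (max with a priority key) structure.
import Mathlib
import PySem

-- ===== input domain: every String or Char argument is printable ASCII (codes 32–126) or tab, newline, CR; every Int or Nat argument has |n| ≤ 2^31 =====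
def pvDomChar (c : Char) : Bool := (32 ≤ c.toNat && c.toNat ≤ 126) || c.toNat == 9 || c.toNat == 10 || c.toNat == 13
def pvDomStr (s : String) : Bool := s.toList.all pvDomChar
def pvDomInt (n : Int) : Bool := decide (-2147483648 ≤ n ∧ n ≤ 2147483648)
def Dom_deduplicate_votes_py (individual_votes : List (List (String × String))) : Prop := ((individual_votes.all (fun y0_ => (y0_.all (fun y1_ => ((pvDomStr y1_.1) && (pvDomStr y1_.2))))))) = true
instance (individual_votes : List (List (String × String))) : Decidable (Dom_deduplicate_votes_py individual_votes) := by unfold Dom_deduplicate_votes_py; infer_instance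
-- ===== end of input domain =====

-- B groups all votes per normalized name first, then takes the first maximal entry of each
-- group, instead of A's single running-max dict; same O(n) cost, different decomposition.
-- Pre_ excludes entries missing the "member_name" or "member_vote" key, on which Python A raises KeyError.

-- ===== PORT A =====
-- shared constants/helpers of both Pythons (vote_priority and the subscript/strip/lower/priority expressions)
def pvVotePriority : PySem.Dict String Int :=
  PySem.Dict.mk [("no", 4), ("abstain", 3), ("absent", 2), ("yes", 1)]

-- vote_entry["member_name"].strip().lower(); the "" default is only reached outside Pre_ (KeyError in Python)
def pvNameLower (ve : List (String × String)) : String :=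
  PySem.Str.lower (PySem.Str.strip ((PySem.Dict.mk ve).getD "member_name" ""))

-- vote_priority.get(vote_entry["member_vote"], 0); the "" default is only reached outside Pre_
def pvPriority (ve : List (String × String)) : Int :=
  pvVotePriority.getD ((PySem.Dict.mk ve).getD "member_vote" "") 0

-- one iteration of A's loop; the ([], 0) default of getD is only evaluated when the key is present
def pvStepA (seen : PySem.Dict String (List (String × String) × Int))
    (ve : List (String × String)) : PySem.Dict String (List (String × String) × Int) :=
  if (!seen.contains (pvNameLower ve))
      || decide ((seen.getD (pvNameLower ve) ([], 0)).2 < pvPriority ve) then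
    seen.insert (pvNameLower ve) (ve, pvPriority ve)
  else seen

def deduplicate_votes_py (individual_votes : List (List (String × String))) : List (List (String × String)) :=
  if individual_votes = [] then individual_votes
  else
    let seen := individual_votes.foldl pvStepA PySem.Dict.empty
    seen.values.map (fun e => e.1)

-- ===== PORT B =====
-- one iteration of B's grouping loop: groups.setdefault(name, []).append(vote_entry)
def pvStepB (groups : PySem.Dict String (List (List (String × String))))
    (ve : List (String × String)) : PySem.Dict String (List (List (String × String))) :=
  groups.modify (pvNameLower ve) [] (fun grp => grp ++ [ve])

-- max(group, key=priority); the [] default is never reached (groups are nonempty)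
def pvGroupMax (grp : List (List (String × String))) : List (String × String) :=
  (PySem.List.max? grp pvPriority).getD []

def deduplicate_votes_py_alt (individual_votes : List (List (String × String))) : List (List (String × String)) :=
  if individual_votes = [] then individual_votes
  else
    let groups := individual_votes.foldl pvStepB PySem.Dict.empty
    groups.values.map pvGroupMax

-- ===== PRECONDITION & SPEC =====
-- Pre_ excludes exactly the inputs where Python A (and B) raise KeyError: an entry without a
-- "member_name" or "member_vote" key.
def Pre_deduplicate_votes_py (individual_votes : List (List (String × String))) : Prop :=
  ∀ ve ∈ individual_votes,
    ((PySem.Dict.mk ve).contains "member_name") = true ∧ ((PySem.Dict.mk ve).contains "member_vote") = true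
instance (individual_votes : List (List (String × String))) : Decidable (Pre_deduplicate_votes_py individual_votes) := by
  unfold Pre_deduplicate_votes_py; infer_instance

def pvWitness_deduplicate_votes_py : (List (List (String × String))) :=
  [[("member_name", " Al "), ("member_vote", "yes")], [("member_name", "al"), ("member_vote", "no")]]

def Spec_deduplicate_votes_py (individual_votes : List (List (String × String))) (out : List (List (String × String))) : Prop := out = deduplicate_votes_py_alt individual_votes
instance (individual_votes : List (List (String × String))) (out : List (List (String × String))) : Decidable (Spec_deduplicate_votes_py individual_votes out) := by unfold Spec_deduplicate_votes_py; infer_instance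

-- ===== CLAIM (what is proved, stated in full; the proofs are below) =====
def Claim_equal_deduplicate_votes_py : Prop := ∀ (individual_votes : List (List (String × String))), Dom_deduplicate_votes_py individual_votes → Pre_deduplicate_votes_py individual_votes → Spec_deduplicate_votes_py individual_votes (deduplicate_votes_py individual_votes)

-- ===== LEMMAS AND PROOFS =====

-- the per-group summary B's second pass computes, as a pair-transformer on items
def pvF (kv : String × List (List (String × String))) : String × (List (String × String) × Int) :=
  (kv.1, (pvGroupMax kv.2, pvPriority (pvGroupMax kv.2)))

-- the simulation map from B's grouping dict to A's running dict
def pvT (g : PySem.Dict String (List (List (String × String)))) :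
    PySem.Dict String (List (String × String) × Int) :=
  PySem.Dict.mk (g.items.map pvF)

-- the invariant carried along B's loop: nonempty groups, no duplicate keys
def pvInv (g : PySem.Dict String (List (List (String × String)))) : Prop :=
  (∀ kv ∈ g.items, kv.2 ≠ []) ∧ g.keys.Nodup

theorem pvT_contains (g : PySem.Dict String (List (List (String × String)))) (k : String) :
    (pvT g).contains k = g.contains k := by
  simp only [pvT, PySem.Dict.contains, List.any_map]
  rfl

theorem pvT_get? (g : PySem.Dict String (List (List (String × String)))) (k : String) :
    (pvT g).get? k = (g.get? k).map (fun grp => (pvGroupMax grp, pvPriority (pvGroupMax grp))) := by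
  obtain ⟨l⟩ := g
  induction l with
  | nil => rfl
  | cons kv t ih =>
      by_cases h : (kv.1 == k) = true
      · simp [pvT, PySem.Dict.get?, pvF, h]
      · simpa [pvT, PySem.Dict.get?, pvF, h] using ih

theorem pvGet?_eq_none_of_not_contains {ν : Type} (d : PySem.Dict String ν) (k : String)
    (h : d.contains k = false) : d.get? k = none := by
  obtain ⟨l⟩ := d
  simp only [PySem.Dict.contains, List.any_eq_false] at h
  simp only [PySem.Dict.get?, Option.map_eq_none_iff, List.find?_eq_none]
  intro p hp
  exact h p hp

theorem pvGet?_of_mem {ν : Type} (l : List (String × ν)) (hnd : (l.map Prod.fst).Nodup)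
    (p : String × ν) (hp : p ∈ l) : (PySem.Dict.mk l).get? p.1 = some p.2 := by
  induction l with
  | nil => cases hp
  | cons q t ih =>
      simp only [List.map_cons, List.nodup_cons] at hnd
      rcases List.mem_cons.mp hp with h | h
      · subst h; simp [PySem.Dict.get?]
      · have hne : (q.1 == p.1) = false := by
          have : p.1 ∈ t.map Prod.fst := List.mem_map_of_mem h
          simp only [beq_eq_false_iff_ne, ne_eq]
          intro hq; exact hnd.1 (hq ▸ this)
        simpa [PySem.Dict.get?, hne] using ih hnd.2 h

theorem pvMem_insert_items {ν : Type} (d : PySem.Dict String ν) (k : String) (v : ν)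
    (kv : String × ν) (h : kv ∈ (d.insert k v).items) : kv.2 = v ∨ kv ∈ d.items := by
  obtain ⟨l⟩ := d
  by_cases hc : (PySem.Dict.mk l).contains k = true
  · simp only [PySem.Dict.insert, hc, if_true, List.mem_map] at h
    obtain ⟨p, hp, hpe⟩ := h
    by_cases hpk : (p.1 == k) = true
    · left; simp [hpk] at hpe; rw [← hpe]
    · right; simp [hpk] at hpe; exact hpe ▸ hp
  · simp only [PySem.Dict.insert, hc] at h
    rcases List.mem_append.mp h with h | h
    · exact Or.inr h
    · rcases List.mem_singleton.mp h with rfl; exact Or.inl rfl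

theorem pvKeys_insert_nodup {ν : Type} (d : PySem.Dict String ν) (k : String) (v : ν)
    (h : d.keys.Nodup) : (d.insert k v).keys.Nodup := by
  obtain ⟨l⟩ := d
  by_cases hc : (PySem.Dict.mk l).contains k = true
  · have hkeys : ((PySem.Dict.mk l).insert k v).keys = (PySem.Dict.mk l).keys := by
      simp only [PySem.Dict.insert, hc, if_true, PySem.Dict.keys, List.map_map]
      apply List.map_congr_left
      intro p _
      by_cases hpk : (p.1 == k) = true
      · simpa [Function.comp, hpk] using (eq_of_beq hpk).symm
      · simp [Function.comp, hpk]
    rw [hkeys]; exact h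
  · have hk : ∀ p ∈ l, ¬ p.1 = k := by
      intro p hp hpe
      exact hc (by
        simp only [PySem.Dict.contains, List.any_eq_true]
        exact ⟨p, hp, by simp [hpe]⟩)
    have hkeys : ((PySem.Dict.mk l).insert k v).keys
        = (PySem.Dict.mk l).keys ++ [k] := by
      simp [PySem.Dict.insert, hc, PySem.Dict.keys]
    rw [hkeys]
    rw [List.nodup_append]
    refine ⟨h, List.nodup_singleton _, ?_⟩
    intro a ha b hb
    have hb' : b = k := List.mem_singleton.mp hb
    simp only [PySem.Dict.keys, List.mem_map] at ha
    obtain ⟨p, hp, hpe⟩ := ha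
    intro hab
    exact hk p hp (hpe.trans (hab.trans hb'))

theorem pvMax?_append_singleton {α κ : Type} [LT κ] [DecidableLT κ]
    (xs : List α) (x : α) (key : α → κ) :
    PySem.List.max? (xs ++ [x]) key =
      match PySem.List.max? xs key with
      | none => some x
      | some m => if key m < key x then some x else some m := by
  simp only [PySem.List.max?, List.foldl_append, List.foldl_cons, List.foldl_nil]
  rfl

theorem pvGroupMax_append (grp : List (List (String × String))) (ve : List (String × String))
    (h : grp ≠ []) :
    pvGroupMax (grp ++ [ve]) =
      if pvPriority (pvGroupMax grp) < pvPriority ve then ve else pvGroupMax grp := by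
  obtain ⟨m, hm⟩ : ∃ m, PySem.List.max? grp pvPriority = some m := by
    cases hh : PySem.List.max? grp pvPriority with
    | none => exact absurd ((PySem.List.max?_eq_none_iff grp pvPriority).mp hh) h
    | some m => exact ⟨m, rfl⟩
  have hstep : PySem.List.max? (grp ++ [ve]) pvPriority
      = if pvPriority m < pvPriority ve then some ve else some m := by
    rw [pvMax?_append_singleton, hm]
  have hm' : pvGroupMax grp = m := by simp [pvGroupMax, hm]
  by_cases hlt : pvPriority m < pvPriority ve
  · simp [pvGroupMax, hstep, hlt, hm]
  · simp [pvGroupMax, hstep, hlt, hm]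

-- one step of A's loop simulates one step of B's grouping loop through pvT
theorem pvStep_sim (g : PySem.Dict String (List (List (String × String))))
    (ve : List (String × String)) (hinv : pvInv g) :
    pvStepA (pvT g) ve = pvT (pvStepB g ve) := by
  obtain ⟨hne, hnd⟩ := hinv
  by_cases hc : g.contains (pvNameLower ve) = true
  · -- key already present: A compares against the stored group max, B appends to the group
    obtain ⟨grp, hg⟩ : ∃ grp, g.get? (pvNameLower ve) = some grp := by
      cases hh : g.get? (pvNameLower ve) with
      | none =>
          exfalso
          obtain ⟨l⟩ := g
          simp only [PySem.Dict.contains, List.any_eq_true] at hc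
          obtain ⟨p, hp, hpk⟩ := hc
          simp only [PySem.Dict.get?, Option.map_eq_none_iff, List.find?_eq_none] at hh
          exact absurd hpk (by simpa using hh p hp)
      | some grp => exact ⟨grp, rfl⟩
    have hmem_val : ∀ p ∈ g.items, (p.1 == pvNameLower ve) = true → p.2 = grp := by
      intro p hp hpk
      have := pvGet?_of_mem g.items hnd p hp
      rw [eq_of_beq hpk, hg] at this
      exact (Option.some.injEq _ _ ▸ this).symm ▸ rfl
    have hgrpne : grp ≠ [] := by
      obtain ⟨l⟩ := g
      simp only [PySem.Dict.get?, Option.map_eq_some_iff] at hg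
      obtain ⟨p, hfind, hpe⟩ := hg
      exact hpe ▸ hne p (List.mem_of_find?_eq_some hfind)
    have hgetD : g.getD (pvNameLower ve) [] = grp := by simp [PySem.Dict.getD, hg]
    have hTc : (pvT g).contains (pvNameLower ve) = true := by rw [pvT_contains]; exact hc
    have hTgetD : (pvT g).getD (pvNameLower ve) ([], 0) =
        (pvGroupMax grp, pvPriority (pvGroupMax grp)) := by
      simp [PySem.Dict.getD, pvT_get?, hg]
    unfold pvStepA pvStepB
    rw [hTgetD, hTc]
    simp only [PySem.Dict.modify, hgetD, Bool.not_true, Bool.false_or]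
    obtain ⟨l⟩ := g
    by_cases hlt : pvPriority (pvGroupMax grp) < pvPriority ve
    · -- strictly better: A overwrites with ve; B's appended group has max ve
      simp only [hlt, decide_true, if_true]
      have hTc' : (PySem.Dict.mk (l.map pvF)).contains (pvNameLower ve) = true := hTc
      simp only [pvT, PySem.Dict.insert, hTc', hc, if_true, List.map_map]
      apply PySem.Dict.ext
      apply List.map_congr_left
      intro p hp
      by_cases hpk : (p.1 == pvNameLower ve) = true
      · have hpg := hmem_val p hp hpk
        simp only [Function.comp, pvF, hpk, if_true, hpg]
        rw [pvGroupMax_append grp ve hgrpne]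
        simp [hlt]
      · simp [Function.comp, pvF, hpk]
    · -- not better: A keeps the dict; B appends but the group max is unchanged
      simp only [hlt, decide_false]
      simp only [pvT, PySem.Dict.insert, hc, if_true, List.map_map]
      apply PySem.Dict.ext
      symm
      apply List.map_congr_left
      intro p hp
      by_cases hpk : (p.1 == pvNameLower ve) = true
      · have hpg := hmem_val p hp hpk
        simp only [Function.comp, pvF, hpk, if_true]
        rw [pvGroupMax_append grp ve hgrpne]
        simp only [hlt, if_false]
        rw [← eq_of_beq hpk, ← hpg]
      · simp [Function.comp, pvF, hpk]
  · -- new key: both append a fresh entry; the singleton group's max is ve itself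
    have hTc : (pvT g).contains (pvNameLower ve) = false := by
      rw [pvT_contains]; exact (Bool.not_eq_true _).mp hc
    have hgetD : g.getD (pvNameLower ve) [] = [] := by
      simp [PySem.Dict.getD, pvGet?_eq_none_of_not_contains g _ ((Bool.not_eq_true _).mp hc)]
    unfold pvStepA pvStepB
    rw [hTc]
    simp only [PySem.Dict.modify, hgetD, List.nil_append]
    obtain ⟨l⟩ := g
    have hTc' : (PySem.Dict.mk (l.map pvF)).contains (pvNameLower ve) = false := hTc
    have hc' : (PySem.Dict.mk l).contains (pvNameLower ve) = false := (Bool.not_eq_true _).mp hc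
    simp only [pvT, PySem.Dict.insert, hTc', hc', Bool.false_eq_true, if_false, List.map_append]
    rfl

-- the invariant is preserved by B's grouping step
theorem pvStepB_inv (g : PySem.Dict String (List (List (String × String))))
    (ve : List (String × String)) (hinv : pvInv g) : pvInv (pvStepB g ve) := by
  obtain ⟨hne, hnd⟩ := hinv
  constructor
  · intro kv hkv
    rcases pvMem_insert_items g _ _ kv hkv with h | h
    · rw [h]; exact List.append_ne_nil_of_right_ne_nil _ (by simp)
    · exact hne kv h
  · exact pvKeys_insert_nodup g _ _ hnd

theorem pvFold_sim (ivs : List (List (String × String)))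
    (g : PySem.Dict String (List (List (String × String)))) (hinv : pvInv g) :
    ivs.foldl pvStepA (pvT g) = pvT (ivs.foldl pvStepB g) := by
  induction ivs generalizing g with
  | nil => rfl
  | cons ve t ih =>
      simp only [List.foldl_cons]
      rw [pvStep_sim g ve hinv]
      exact ih _ (pvStepB_inv g ve hinv)

-- ===== VERDICT (by name: the statement is the Claim_ definition above) =====
theorem deduplicate_votes_py_spec : Claim_equal_deduplicate_votes_py := by
  intro ivs _ _
  unfold Spec_deduplicate_votes_py deduplicate_votes_py deduplicate_votes_py_alt
  by_cases h : ivs = []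
  · simp [h]
  · simp only [h, if_false]
    have hT : pvT PySem.Dict.empty = PySem.Dict.empty := rfl
    have hinv0 : pvInv PySem.Dict.empty := ⟨fun kv hkv => absurd hkv List.not_mem_nil, List.nodup_nil⟩
    rw [← hT, pvFold_sim ivs PySem.Dict.empty hinv0]
    simp [pvT, PySem.Dict.values, List.map_map, Function.comp, pvF]
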